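-- pv_equiv track=rewrite | github.com/codeflash-ai/optimize-me | src/algorithms/string.py | find_common_tags
-- ===== SOURCE A (Python) =====
-- def find_common_tags(articles: list[dict[str, list[str]]]) -> set[str]:
--     if not articles:
--         return set()
--
--     # Find the article with the smallest tags list to initialize common_tags
--     min_idx = 0
--     min_len = len(articles[0].get("tags", []))
--     if min_len == 0:
--         return set()
--
--     for i in range(1, len(articles)):
--         tags_i = articles[i].get("tags", [])
--         li = len(tags_i)
--         if li < min_len:
--             min_len = li
--             min_idx = i
--             if min_len == 0:
--                 return set()
--
--     common_tags = set(articles[min_idx].get("tags", []))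
--     # Iterate over all articles except the one used to initialize common_tags
--     for i in range(len(articles)):
--         if i == min_idx:
--             continue
--         common_tags.intersection_update(articles[i].get("tags", []))
--         if not common_tags:
--             break
--     return common_tags
-- ===== SOURCE B (Python) =====
-- def find_common_tags(articles: list[dict[str, list[str]]]) -> set[str]:
--     if not articles:
--         return set()
--     smallest = min((a.get("tags", []) for a in articles), key=len)
--     return {t for t in set(smallest) if all(t in a.get("tags", []) for a in articles)}
-- ===== Notes on version B (the rewrite author's own statement) =====
-- stated objective: simpler
-- what changed: Replaces A's hand-written min-index search loop and destructive shrinking-set intersection loop with early breaks by a two-line version: min(..., key=len) plus one declarative set comprehension filtering the smallest tag set with all(); no mutable accumulator, index bookkeeping or break logic.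
import Mathlib
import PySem

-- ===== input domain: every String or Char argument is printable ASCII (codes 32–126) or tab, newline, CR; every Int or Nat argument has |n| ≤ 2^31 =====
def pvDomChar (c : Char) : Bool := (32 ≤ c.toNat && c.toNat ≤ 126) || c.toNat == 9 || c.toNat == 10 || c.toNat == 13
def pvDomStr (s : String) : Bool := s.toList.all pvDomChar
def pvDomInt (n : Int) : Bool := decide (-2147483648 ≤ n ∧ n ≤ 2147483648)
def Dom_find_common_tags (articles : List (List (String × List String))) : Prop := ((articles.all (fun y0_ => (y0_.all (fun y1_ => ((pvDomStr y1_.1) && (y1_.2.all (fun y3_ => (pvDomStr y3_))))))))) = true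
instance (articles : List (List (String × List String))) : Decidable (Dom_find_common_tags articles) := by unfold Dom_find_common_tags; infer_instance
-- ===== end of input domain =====

-- B replaces A's hand-rolled min-index search and destructive shrinking-set intersection loop
-- (with early breaks) by min(..., key=len) plus one declarative filter with all(); objective:
-- simpler/idiomatic, same cost. Return value is a Python set, so only its members are compared.

-- ===== PORT A =====
-- a.get("tags", [])
def pvTags (a : List (String × List String)) : List String := PySem.Dict.getD (PySem.Dict.mk a) "tags" []

-- the body of A's 'for i in range(1, len(articles))' loop; state none = the early 'return set()'
def pvScan (articles : List (List (String × List String))) (st : Option (Nat × Int)) (i : Int) :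
    Option (Nat × Int) :=
  match st with
  | none => none
  | some (min_len, min_idx) =>
    let tags_i := pvTags (PySem.List.pyGetD articles i [])
    let li := tags_i.length
    if li < min_len then
      if li = 0 then none else some (li, i)
    else some (min_len, min_idx)

-- the body of A's second loop; Bool flag = 'we have executed break'
def pvInterStep (articles : List (List (String × List String))) (min_idx : Int)
    (st : PySem.Set String × Bool) (i : Int) : PySem.Set String × Bool :=
  match st with
  | (ct, true) => (ct, true)
  | (ct, false) =>
    if i == min_idx then (ct, false)
    else
      let ct' := PySem.Set.inter ct (pvTags (PySem.List.pyGetD articles i []))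
      (ct', ct'.isEmpty)

def find_common_tags (articles : List (List (String × List String))) : List String :=
  if articles.isEmpty then []
  else
    let min_len := (pvTags (PySem.List.pyGetD articles 0 [])).length
    if min_len = 0 then []
    else
      match (PySem.List.pyRange 1 (articles.length : Int) 1).foldl (pvScan articles)
          (some (min_len, 0)) with
      | none => []
      | some (_, min_idx) =>
        let common0 : PySem.Set String :=
          PySem.Set.ofList (pvTags (PySem.List.pyGetD articles min_idx []))
        ((PySem.List.pyRange 0 (articles.length : Int) 1).foldl
          (pvInterStep articles min_idx) (common0, false)).1

-- ===== PORT B =====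
def find_common_tags_alt (articles : List (List (String × List String))) : List String :=
  match articles with
  | [] => []
  | _ :: _ =>
    -- min((a.get("tags", []) for a in articles), key=len); articles ≠ [] so min? is some and getD [] is never hit
    let smallest := (PySem.List.min? (articles.map (fun a => PySem.Dict.getD (PySem.Dict.mk a) "tags" []))
        (fun l => l.length)).getD []
    -- {t for t in set(smallest) if all(...)}: set(smallest) is duplicate-free, so building the
    -- result set in iteration order is List.filter on the Set's list (exact as a set)
    (PySem.Set.ofList smallest).filter
      (fun t => articles.all (fun a => (PySem.Dict.getD (PySem.Dict.mk a) "tags" []).contains t))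

-- ===== PRECONDITION & SPEC =====
def Spec_find_common_tags (articles : List (List (String × List String))) (out : List String) : Prop := out = find_common_tags_alt articles
instance (articles : List (List (String × List String))) (out : List String) : Decidable (Spec_find_common_tags articles out) := by unfold Spec_find_common_tags; infer_instance

-- ===== CLAIM (what is proved, stated in full; the proofs are below) =====
def Claim_equal_find_common_tags : Prop := ∀ (articles : List (List (String × List String))), Dom_find_common_tags articles → Spec_find_common_tags articles (find_common_tags articles)

-- ===== LEMMAS AND PROOFS =====

-- running minimum over the tag lists, keeping the FIRST minimum (min?'s step with a some state)
def pvMinList (m x : List String) : List String := if x.length < m.length then x else m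

theorem pvScan_none (articles : List (List (String × List String))) (l : List Int) :
    l.foldl (pvScan articles) none = none := by
  induction l with
  | nil => rfl
  | cons i l ih => simpa [pvScan] using ih

theorem pvInterStep_stuck (articles : List (List (String × List String))) (mi : Int)
    (l : List Int) (ct : PySem.Set String) :
    l.foldl (pvInterStep articles mi) (ct, true) = (ct, true) := by
  induction l with
  | nil => rfl
  | cons i l ih => simpa [pvInterStep] using ih

theorem pvMinList_zero (l : List (List String)) (m : List String) (h : m.length = 0) :
    l.foldl pvMinList m = m := by
  induction l with
  | nil => rfl
  | cons x l ih => simp [pvMinList, h, ih]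

theorem pvMin?_cons (x : List String) (t : List (List String)) :
    PySem.List.min? (x :: t) (fun l => l.length) = some (t.foldl pvMinList x) := by
  induction t generalizing x with
  | nil => simp [PySem.List.min?]
  | cons y t ih =>
    have h := ih (pvMinList x y)
    simp only [PySem.List.min?, List.foldl_cons] at h ⊢
    convert h using 2
    split <;> simp [pvMinList, *]

theorem pvScan_spec (articles : List (List (String × List String))) :
    ∀ (l : List Int), (∀ i ∈ l, 0 ≤ i ∧ i < (articles.length : Int)) →
    ∀ (ml : Nat) (mi : Int) (mls : List String), ml = mls.length → 0 < ml →
      0 ≤ mi → mi < (articles.length : Int) →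
      pvTags (PySem.List.pyGetD articles mi []) = mls →
      (l.foldl (pvScan articles) (some (ml, mi)) = none →
        ((l.map (fun i => pvTags (PySem.List.pyGetD articles i []))).foldl pvMinList mls).length = 0)
      ∧ (∀ ml' mi', l.foldl (pvScan articles) (some (ml, mi)) = some (ml', mi') →
          ml' = ((l.map (fun i => pvTags (PySem.List.pyGetD articles i []))).foldl pvMinList mls).length
          ∧ 0 ≤ mi' ∧ mi' < (articles.length : Int)
          ∧ pvTags (PySem.List.pyGetD articles mi' [])
              = (l.map (fun i => pvTags (PySem.List.pyGetD articles i []))).foldl pvMinList mls) := by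
  intro l
  induction l with
  | nil =>
    intro _ ml mi mls h1 h2 h3 h4 h5
    refine ⟨by intro h; simp at h, ?_⟩
    intro ml' mi' h
    simp only [List.foldl_nil, Option.some.injEq, Prod.mk.injEq] at h
    obtain ⟨hml, hmi⟩ := h
    subst hml hmi
    exact ⟨h1, h3, h4, by simpa using h5⟩
  | cons i l ih =>
    intro hl ml mi mls h1 h2 h3 h4 h5
    have hi := hl i (List.mem_cons_self ..)
    have hl' : ∀ j ∈ l, 0 ≤ j ∧ j < (articles.length : Int) :=
      fun j hj => hl j (List.mem_cons_of_mem _ hj)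
    simp only [List.foldl_cons, List.map_cons]
    by_cases hlt : (pvTags (PySem.List.pyGetD articles i [])).length < ml
    · have hmin : pvMinList mls (pvTags (PySem.List.pyGetD articles i []))
          = pvTags (PySem.List.pyGetD articles i []) := by
        simp [pvMinList, h1 ▸ hlt]
      by_cases hz : (pvTags (PySem.List.pyGetD articles i [])).length = 0
      · have hstep : pvScan articles (some (ml, mi)) i = none := by
          simp [pvScan, hz]
          omega
        rw [hstep, pvScan_none, hmin]
        refine ⟨fun _ => ?_, fun ml' mi' h => by simp at h⟩
        rw [pvMinList_zero _ _ hz, hz]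
      · have hstep : pvScan articles (some (ml, mi)) i
            = some ((pvTags (PySem.List.pyGetD articles i [])).length, i) := by
          simp [pvScan, hlt, hz]
        rw [hstep, hmin]
        exact ih hl' _ i _ rfl (Nat.pos_of_ne_zero hz) hi.1 hi.2 rfl
    · have hmin : pvMinList mls (pvTags (PySem.List.pyGetD articles i [])) = mls := by
        simp [pvMinList, h1 ▸ hlt]
      have hstep : pvScan articles (some (ml, mi)) i = some (ml, mi) := by
        simp [pvScan, hlt]
      rw [hstep, hmin]
      exact ih hl' ml mi mls h1 h2 h3 h4 h5

theorem pvInter_spec (articles : List (List (String × List String))) (mi : Int) :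
    ∀ (l : List Int) (ct : PySem.Set String) (b : Bool), (b = true → ct = []) →
      (l.foldl (pvInterStep articles mi) (ct, b)).1
        = ct.filter (fun x =>
            l.all (fun i => i == mi || (pvTags (PySem.List.pyGetD articles i [])).contains x)) := by
  intro l
  induction l with
  | nil => intro ct b _; simp
  | cons i l ih =>
    intro ct b hb
    cases b with
    | true =>
      rw [hb rfl]
      simp only [List.foldl_cons]
      have : pvInterStep articles mi ([], true) i = ([], true) := rfl
      rw [this, pvInterStep_stuck]
      simp
    | false =>
      simp only [List.foldl_cons, List.all_cons]
      by_cases him : (i == mi) = true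
      · have : pvInterStep articles mi (ct, false) i = (ct, false) := by
          simp [pvInterStep, him]
        rw [this, ih ct false (by simp)]
        refine List.filter_congr ?_
        intro x _
        simp [him]
      · have hne : (i == mi) = false := by simpa using him
        have : pvInterStep articles mi (ct, false) i
            = (ct.filter (fun x => (pvTags (PySem.List.pyGetD articles i [])).contains x),
               (ct.filter (fun x => (pvTags (PySem.List.pyGetD articles i [])).contains x)).isEmpty) := by
          simp [pvInterStep, hne, PySem.Set.inter, PySem.Set.contains]
        rw [this, ih _ _ (fun h => List.isEmpty_iff.mp h), List.filter_filter]
        refine List.filter_congr ?_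
        intro x _
        simp [hne, Bool.and_comm]

theorem pvAll_range (articles : List (List (String × List String))) (mi : Int)
    (h3 : 0 ≤ mi) (h4 : mi < (articles.length : Int)) (x : String)
    (hx : x ∈ pvTags (PySem.List.pyGetD articles mi [])) :
    (PySem.List.pyRange 0 (articles.length : Int) 1).all
        (fun i => i == mi || (pvTags (PySem.List.pyGetD articles i [])).contains x)
      = articles.all (fun a => (pvTags a).contains x) := by
  rw [Bool.eq_iff_iff]
  simp only [List.all_eq_true, PySem.List.mem_pyRange_one, Bool.or_eq_true, beq_iff_eq,
    List.contains_iff_mem]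
  constructor
  · intro h a ha
    obtain ⟨k, hk, rfl⟩ := List.mem_iff_getElem.mp ha
    have hbounds : (0 : Int) ≤ (k : Int) ∧ (k : Int) < (articles.length : Int) := by
      constructor <;> [positivity; exact_mod_cast hk]
    have hget : PySem.List.pyGetD articles (k : Int) [] = articles[k] := by
      rw [PySem.List.pyGetD_eq_getElem articles [] hbounds.1 hbounds.2]
      simp
    rcases h (k : Int) hbounds with hik | hmem
    · rw [← hget, hik]; exact hx
    · rw [← hget]; exact hmem
  · intro h i hi
    by_cases him : i = mi
    · exact Or.inl him
    · refine Or.inr (h _ ?_)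
      exact PySem.List.pyGetD_mem articles [] ⟨by omega, hi.2⟩

-- rewrites B's inline 'a.get("tags", [])' to the shared pvTags
theorem pvTags_def (a : List (String × List String)) :
    PySem.Dict.getD (PySem.Dict.mk a) "tags" [] = pvTags a := rfl

-- B's value on a nonempty input, with the min? fold spelled out
theorem pvAlt_eq (a0 : List (String × List String)) (rest : List (List (String × List String))) :
    find_common_tags_alt (a0 :: rest)
      = (PySem.Set.ofList ((rest.map pvTags).foldl pvMinList (pvTags a0))).filter
          (fun t => (a0 :: rest).all (fun a => (pvTags a).contains t)) := by
  simp only [find_common_tags_alt, pvTags_def, List.map_cons, pvMin?_cons, Option.getD_some]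

-- B returns [] as soon as the shortest tag list is empty
theorem pvAlt_eq_nil (a0 : List (String × List String)) (rest : List (List (String × List String)))
    (h : ((rest.map pvTags).foldl pvMinList (pvTags a0)).length = 0) :
    find_common_tags_alt (a0 :: rest) = [] := by
  rw [pvAlt_eq, List.length_eq_zero_iff.mp h]
  rfl

-- ===== VERDICT (by name: the statement is the Claim_ definition above) =====
theorem find_common_tags_spec : Claim_equal_find_common_tags := by
  intro articles _
  unfold Spec_find_common_tags
  cases articles with
  | nil => rfl
  | cons a0 rest =>
    simp only [find_common_tags, List.isEmpty_cons, PySem.List.pyGetD_zero_cons,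
      Bool.false_eq_true, if_false]
    by_cases h0 : (pvTags a0).length = 0
    · rw [if_pos h0, pvAlt_eq_nil]
      rw [pvMinList_zero _ _ h0]
      exact h0
    · rw [if_neg h0]
      have hl : ∀ i ∈ PySem.List.pyRange 1 ((a0 :: rest).length : Int) 1,
          0 ≤ i ∧ i < ((a0 :: rest).length : Int) := by
        intro i hi
        rw [PySem.List.mem_pyRange_one] at hi
        omega
      have hspec := pvScan_spec (a0 :: rest) _ hl ((pvTags a0).length) 0 (pvTags a0) rfl
        (Nat.pos_of_ne_zero h0) (by norm_num) (by exact_mod_cast Nat.succ_pos rest.length)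
        (by rw [PySem.List.pyGetD_zero_cons])
      have hmapEq : (PySem.List.pyRange 1 ((a0 :: rest).length : Int) 1).map
            (fun i => pvTags (PySem.List.pyGetD (a0 :: rest) i []))
          = rest.map pvTags := by
        rw [show (fun i => pvTags (PySem.List.pyGetD (a0 :: rest) i []))
              = pvTags ∘ (fun j => PySem.List.pyGetD (a0 :: rest) j []) from rfl,
          ← List.map_map, PySem.List.map_pyGetD_pyRange' (a0 :: rest) [] (a := 1) (by norm_num)]
        rfl
      rw [hmapEq] at hspec
      cases hfold : (PySem.List.pyRange 1 ((a0 :: rest).length : Int) 1).foldl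
          (pvScan (a0 :: rest)) (some ((pvTags a0).length, 0)) with
      | none =>
        rw [pvAlt_eq_nil _ _ (hspec.1 hfold)]
      | some p =>
        obtain ⟨ml', mi'⟩ := p
        obtain ⟨hml', hmi0, hmi, hM⟩ := hspec.2 ml' mi' hfold
        show (List.foldl (pvInterStep (a0 :: rest) mi')
            (PySem.Set.ofList (pvTags (PySem.List.pyGetD (a0 :: rest) mi' [])), false)
            (PySem.List.pyRange 0 ((a0 :: rest).length : Int))).1 = _
        rw [pvInter_spec (a0 :: rest) mi' _ _ false (by simp), hM, pvAlt_eq]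
        refine List.filter_congr ?_
        intro x hx
        refine pvAll_range (a0 :: rest) mi' hmi0 hmi x ?_
        rw [hM]
        exact (PySem.Set.mem_ofList _ _).mp hx
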